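-- pv_equiv track=rewrite | github.com/zhiyanliu/autogluon-assistant | src/autogluon/assistant/tools_registry/utils.py | _split_large_section
-- ===== SOURCE A (Python) =====
-- from typing import List
--
-- def _split_large_section(section: str, max_chunk_size: int) -> List[str]:
--     """
--     Split a large section into smaller chunks while preserving code blocks and paragraphs.
--
--     Args:
--         section: The section content to split
--         max_chunk_size: Maximum size of each chunk
--
--     Returns:
--         List of section chunks
--     """
--     chunks = []
--     lines = section.split("\n")
--     current_chunk = []
--     current_size = 0
--     in_code_block = False
--     code_block_content = []
--
--     for line in lines:
--         # Handle code blocks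
--         if line.startswith("```"):
--             if in_code_block:
--                 # End of code block
--                 code_block_content.append(line)
--                 code_block = "\n".join(code_block_content)
--
--                 # If code block would exceed chunk size on its own, make it its own chunk
--                 if len(code_block) > max_chunk_size:
--                     if current_chunk:
--                         chunks.append("\n".join(current_chunk))
--                         current_chunk = []
--                     chunks.append(code_block)
--                     current_size = 0
--                 else:
--                     # If adding code block would exceed size, start new chunk
--                     if current_size + len(code_block) > max_chunk_size and current_chunk:
--                         chunks.append("\n".join(current_chunk))
--                         current_chunk = []
--                         current_size = 0
--                     current_chunk.extend(code_block_content)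
--                     current_size += len(code_block)
--
--                 code_block_content = []
--                 in_code_block = False
--             else:
--                 # Start of code block
--                 in_code_block = True
--                 code_block_content = [line]
--             continue
--
--         if in_code_block:
--             code_block_content.append(line)
--             continue
--
--         # Handle regular lines
--         line_length = len(line) + 1  # +1 for newline
--
--         # Start new chunk if adding this line would exceed max_size
--         if current_size + line_length > max_chunk_size and current_chunk:
--             chunks.append("\n".join(current_chunk))
--             current_chunk = []
--             current_size = 0
--
--         current_chunk.append(line)
--         current_size += line_length
--
--     # Add any remaining content
--     if current_chunk:
--         chunks.append("\n".join(current_chunk))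
--
--     return chunks
-- ===== SOURCE B (Python) =====
-- from typing import List
--
-- def _split_large_section(section: str, max_chunk_size: int) -> List[str]:
--     """Two-pass rewrite: first parse lines into segments (single lines and whole
--     fenced code blocks), then greedily pack segments into chunks."""
--     lines = section.split("\n")
--     # Pass 1: segmentize. A fence opened but never closed drops the remainder.
--     segments = []
--     i, n = 0, len(lines)
--     while i < n:
--         line = lines[i]
--         if line.startswith("```"):
--             j = i + 1
--             while j < n and not lines[j].startswith("```"):
--                 j += 1
--             if j == n:
--                 break  # unterminated code block: not emitted
--             segments.append(("block", lines[i:j + 1]))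
--             i = j + 1
--         else:
--             segments.append(("line", line))
--             i += 1
--     # Pass 2: greedy packing.
--     chunks, cur, size = [], [], 0
--     for kind, payload in segments:
--         if kind == "block":
--             block = "\n".join(payload)
--             if len(block) > max_chunk_size:
--                 if cur:
--                     chunks.append("\n".join(cur))
--                     cur = []
--                 chunks.append(block)
--                 size = 0
--             else:
--                 if size + len(block) > max_chunk_size and cur:
--                     chunks.append("\n".join(cur))
--                     cur = []
--                     size = 0
--                 cur.extend(payload)
--                 size += len(block)
--         else:
--             ll = len(payload) + 1
--             if size + ll > max_chunk_size and cur: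
--                 chunks.append("\n".join(cur))
--                 cur = []
--                 size = 0
--             cur.append(payload)
--             size += ll
--     if cur:
--         chunks.append("\n".join(cur))
--     return chunks
-- ===== Notes on version B (the rewrite author's own statement) =====
-- stated objective: alternative
-- what changed: Replaced A's single-pass line loop with in_code_block/code_block_content flag state by a two-pass design: a parsing pass that turns the lines into a list of segments (single lines and complete fenced code blocks, an unterminated fence dropping the remainder), then a separate greedy packing pass over the segments.
import Mathlib
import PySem

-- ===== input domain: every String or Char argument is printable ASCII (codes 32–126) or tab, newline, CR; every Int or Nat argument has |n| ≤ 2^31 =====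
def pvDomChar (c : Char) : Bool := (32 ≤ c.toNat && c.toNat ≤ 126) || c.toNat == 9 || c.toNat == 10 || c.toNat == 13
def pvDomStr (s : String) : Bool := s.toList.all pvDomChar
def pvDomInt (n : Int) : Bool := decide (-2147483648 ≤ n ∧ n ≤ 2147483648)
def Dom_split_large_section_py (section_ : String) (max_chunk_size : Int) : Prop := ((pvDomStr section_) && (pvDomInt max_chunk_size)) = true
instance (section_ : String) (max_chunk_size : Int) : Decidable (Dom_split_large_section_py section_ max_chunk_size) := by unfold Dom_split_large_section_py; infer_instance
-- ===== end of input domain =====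

-- B replaces A's one-pass line/flag state machine by a segmentize pass (lines and whole
-- fenced code blocks as units) followed by a separate greedy packing pass; objective: alternative.


-- ===== PORT A =====
-- line.startswith("```")
def pvFence (l : List Char) : Bool := PySem.Chars.startswith l ['`', '`', '`']

-- A's for-loop over lines with state (chunks, current_chunk, current_size, in_code_block,
-- code_block_content); the final `if current_chunk:` flush is the [] case.
def pvLoopA (m : Int) : List (List Char) → List (List Char) → List (List Char) → Int →
    Bool → List (List Char) → List (List Char)
  | [], chunks, cur, _, _, _ =>
      chunks ++ (if cur ≠ [] then [PySem.Chars.join ['\n'] cur] else [])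
  | l :: rest, chunks, cur, size, inCode, cbc =>
      if pvFence l then
        if inCode then
          let content := cbc ++ [l]
          let cb := PySem.Chars.join ['\n'] content
          if (cb.length : Int) > m then
            pvLoopA m rest (chunks ++ (if cur ≠ [] then [PySem.Chars.join ['\n'] cur] else []) ++ [cb]) [] 0 false []
          else
            if (size + (cb.length : Int) > m) ∧ cur ≠ [] then
              pvLoopA m rest (chunks ++ [PySem.Chars.join ['\n'] cur]) content (cb.length : Int) false []
            else
              pvLoopA m rest chunks (cur ++ content) (size + (cb.length : Int)) false []
        else
          pvLoopA m rest chunks cur size true [l]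
      else if inCode then
        pvLoopA m rest chunks cur size true (cbc ++ [l])
      else
        let ll : Int := (l.length : Int) + 1
        if (size + ll > m) ∧ cur ≠ [] then
          pvLoopA m rest (chunks ++ [PySem.Chars.join ['\n'] cur]) [l] ll false cbc
        else
          pvLoopA m rest chunks (cur ++ [l]) (size + ll) false cbc

def split_large_section_py (section_ : String) (max_chunk_size : Int) : List String :=
  (pvLoopA max_chunk_size (PySem.Chars.splitOn section_.toList ['\n']) [] [] 0 false []).map String.ofList

-- ===== PORT B =====
-- a segment: one regular line, or one complete fenced code block (its list of lines)
inductive PvSeg where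
  | line : List Char → PvSeg
  | block : List (List Char) → PvSeg
deriving DecidableEq, Repr

-- Pass 1 of B: segmentize the lines; an unterminated code block is never emitted.
def pvSegments : List (List Char) → List PvSeg
  | [] => []
  | l :: rest =>
      if pvFence l then
        match h : rest.dropWhile (fun x => !pvFence x) with
        | close :: rest' =>
            .block (l :: rest.takeWhile (fun x => !pvFence x) ++ [close]) :: pvSegments rest'
        | [] => []
      else
        .line l :: pvSegments rest
termination_by ls => ls.length
decreasing_by
  · have h1 : (rest.dropWhile (fun x => !pvFence x)).length ≤ rest.length :=
      rest.length_dropWhile_le _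
    rw [h] at h1
    simp at h1 ⊢
    omega
  · simp

-- Pass 2 of B: greedy packing of segments with state (chunks, cur, size).
def pvPack (m : Int) : List PvSeg → List (List Char) → List (List Char) → Int → List (List Char)
  | [], chunks, cur, _ =>
      chunks ++ (if cur ≠ [] then [PySem.Chars.join ['\n'] cur] else [])
  | .line l :: ss, chunks, cur, size =>
      let ll : Int := (l.length : Int) + 1
      if (size + ll > m) ∧ cur ≠ [] then
        pvPack m ss (chunks ++ [PySem.Chars.join ['\n'] cur]) [l] ll
      else
        pvPack m ss chunks (cur ++ [l]) (size + ll)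
  | .block ls :: ss, chunks, cur, size =>
      let cb := PySem.Chars.join ['\n'] ls
      if (cb.length : Int) > m then
        pvPack m ss (chunks ++ (if cur ≠ [] then [PySem.Chars.join ['\n'] cur] else []) ++ [cb]) [] 0
      else if (size + (cb.length : Int) > m) ∧ cur ≠ [] then
        pvPack m ss (chunks ++ [PySem.Chars.join ['\n'] cur]) ls (cb.length : Int)
      else
        pvPack m ss chunks (cur ++ ls) (size + (cb.length : Int))

def split_large_section_py_alt (section_ : String) (max_chunk_size : Int) : List String :=
  (pvPack max_chunk_size (pvSegments (PySem.Chars.splitOn section_.toList ['\n'])) [] [] 0).map String.ofList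

-- ===== PRECONDITION & SPEC =====
def Spec_split_large_section_py (section_ : String) (max_chunk_size : Int) (out : List String) : Prop := out = split_large_section_py_alt section_ max_chunk_size
instance (section_ : String) (max_chunk_size : Int) (out : List String) : Decidable (Spec_split_large_section_py section_ max_chunk_size out) := by unfold Spec_split_large_section_py; infer_instance

-- ===== CLAIM (what is proved, stated in full; the proofs are below) =====
def Claim_equal_split_large_section_py : Prop := ∀ (section_ : String) (max_chunk_size : Int), Dom_split_large_section_py section_ max_chunk_size → Spec_split_large_section_py section_ max_chunk_size (split_large_section_py section_ max_chunk_size)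

-- ===== LEMMAS AND PROOFS =====

-- A's loop while in_code_block = true: it scans to the next fence line; if none remains it
-- ends (dropping the open block), else it performs the end-of-block step on the accumulated
-- content and continues out of code mode.
theorem pvLoopA_inCode (m : Int) (lines : List (List Char)) :
    ∀ chunks cur size cbc,
    pvLoopA m lines chunks cur size true cbc =
      match lines.dropWhile (fun x => !pvFence x) with
      | [] => chunks ++ (if cur ≠ [] then [PySem.Chars.join ['\n'] cur] else [])
      | close :: rest' =>
          let content := cbc ++ lines.takeWhile (fun x => !pvFence x) ++ [close]
          let cb := PySem.Chars.join ['\n'] content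
          if (cb.length : Int) > m then
            pvLoopA m rest' (chunks ++ (if cur ≠ [] then [PySem.Chars.join ['\n'] cur] else []) ++ [cb]) [] 0 false []
          else if (size + (cb.length : Int) > m) ∧ cur ≠ [] then
            pvLoopA m rest' (chunks ++ [PySem.Chars.join ['\n'] cur]) content (cb.length : Int) false []
          else
            pvLoopA m rest' chunks (cur ++ content) (size + (cb.length : Int)) false [] := by
  induction lines with
  | nil => intro chunks cur size cbc; simp [pvLoopA]
  | cons l rest ih =>
      intro chunks cur size cbc
      by_cases hf : pvFence l
      · simp [pvLoopA, hf]
      · simp only [pvLoopA, hf, Bool.false_eq_true, ite_false, if_pos]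
        rw [ih]
        simp [hf]

-- main invariant: A's loop out of code mode equals B's packing of the segmentized rest
theorem pvLoop_eq_pack (m : Int) (n : Nat) :
    ∀ lines : List (List Char), lines.length ≤ n →
    ∀ chunks cur size,
    pvLoopA m lines chunks cur size false [] =
      pvPack m (pvSegments lines) chunks cur size := by
  induction n with
  | zero =>
      intro lines hlen chunks cur size
      have : lines = [] := List.eq_nil_of_length_eq_zero (Nat.le_zero.mp hlen)
      subst this; simp [pvLoopA, pvSegments, pvPack]
  | succ n ih =>
      intro lines hlen chunks cur size
      match lines with
      | [] => simp [pvLoopA, pvSegments, pvPack]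
      | l :: rest =>
          by_cases hf : pvFence l
          · -- fence: A enters code mode with cbc = [l]
            rw [show pvLoopA m (l :: rest) chunks cur size false [] =
                  pvLoopA m rest chunks cur size true [l] by simp [pvLoopA, hf]]
            rw [pvLoopA_inCode]
            rw [show pvSegments (l :: rest) =
                  (if pvFence l then
                    match h : rest.dropWhile (fun x => !pvFence x) with
                    | close :: rest' =>
                        .block (l :: rest.takeWhile (fun x => !pvFence x) ++ [close]) :: pvSegments rest'
                    | [] => []
                  else .line l :: pvSegments rest) from by rw [pvSegments]]
            simp only [hf, if_pos]
            cases h : rest.dropWhile (fun x => !pvFence x) with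
            | nil => simp [pvPack]
            | cons close rest' =>
                have hlt : rest'.length ≤ n := by
                  have h1 : (rest.dropWhile (fun x => !pvFence x)).length ≤ rest.length :=
                    rest.length_dropWhile_le _
                  rw [h] at h1
                  simp at h1 hlen
                  omega
                rw [pvPack]
                simp only [List.cons_append, List.nil_append]
                split_ifs with h1 h2 <;>
                  · rw [ih _ hlt]
          · -- regular line
            rw [show pvSegments (l :: rest) = .line l :: pvSegments rest from by
                  rw [pvSegments]; simp [hf]]
            rw [pvPack]
            rw [show pvLoopA m (l :: rest) chunks cur size false [] =
                  (let ll : Int := (l.length : Int) + 1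
                   if (size + ll > m) ∧ cur ≠ [] then
                     pvLoopA m rest (chunks ++ [PySem.Chars.join ['\n'] cur]) [l] ll false []
                   else pvLoopA m rest chunks (cur ++ [l]) (size + ll) false []) from by
                  simp [pvLoopA, hf]]
            have hlen' : rest.length ≤ n := by simp at hlen; omega
            simp only []
            split_ifs <;> rw [ih _ hlen']

-- ===== VERDICT (by name: the statement is the Claim_ definition above) =====
theorem split_large_section_py_spec : Claim_equal_split_large_section_py := by
  intro section_ m _
  unfold Spec_split_large_section_py split_large_section_py split_large_section_py_alt
  rw [pvLoop_eq_pack m (PySem.Chars.splitOn section_.toList ['\n']).length _ le_rfl]
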